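-- pv_equiv track=rewrite | github.com/fraim-dev/fraim | fraim/workflows/architecture_discovery/unified_component_discovery.py | _group_endpoints_by_service
-- ===== SOURCE A (Python) =====
-- from typing import Any, Dict, List, Optional
--
-- def _group_endpoints_by_service(endpoints: List[Dict[str, Any]]) -> Dict[str, List[Dict[str, Any]]]:
--     """Group REST endpoints by their likely service/component."""
--
--     groups: Dict[str, List[Dict[str, Any]]] = {}
--
--     for endpoint in endpoints:
--         path = endpoint.get('endpoint_path', '')
--
--         # Simple grouping by first path segment
--         service_name = 'api'  # default
--         if path.startswith('/'):
--             parts = path.split('/')[1:2]  # Get first path segment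
--             if parts:
--                 service_name = parts[0] or 'api'
--
--         if service_name not in groups:
--             groups[service_name] = []
--         groups[service_name].append(endpoint)
--
--     return groups
-- ===== SOURCE B (Python) =====
-- def _group_endpoints_by_service(endpoints):
--     """Group REST endpoints by their likely service/component.
--
--     Two-pass re-implementation: compute each endpoint's service key once,
--     take the distinct keys in first-appearance order, then build each
--     group by filtering -- no mutable bucket dict is threaded through a loop.
--     """
--
--     def key(endpoint):
--         path = endpoint.get('endpoint_path', '')
--         if path.startswith('/'):
--             return path.split('/')[1] or 'api'
--         return 'api'
--
--     services = list(dict.fromkeys(key(e) for e in endpoints))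
--     return {s: [e for e in endpoints if key(e) == s] for s in services}
-- ===== Notes on version B (the rewrite author's own statement) =====
-- stated objective: alternative
-- what changed: A threads a mutable bucket dict through one loop (membership test, insert, append per element); B computes a key function, dedups the keys in first-appearance order, and builds each group by a filter pass per distinct key.
import Mathlib
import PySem

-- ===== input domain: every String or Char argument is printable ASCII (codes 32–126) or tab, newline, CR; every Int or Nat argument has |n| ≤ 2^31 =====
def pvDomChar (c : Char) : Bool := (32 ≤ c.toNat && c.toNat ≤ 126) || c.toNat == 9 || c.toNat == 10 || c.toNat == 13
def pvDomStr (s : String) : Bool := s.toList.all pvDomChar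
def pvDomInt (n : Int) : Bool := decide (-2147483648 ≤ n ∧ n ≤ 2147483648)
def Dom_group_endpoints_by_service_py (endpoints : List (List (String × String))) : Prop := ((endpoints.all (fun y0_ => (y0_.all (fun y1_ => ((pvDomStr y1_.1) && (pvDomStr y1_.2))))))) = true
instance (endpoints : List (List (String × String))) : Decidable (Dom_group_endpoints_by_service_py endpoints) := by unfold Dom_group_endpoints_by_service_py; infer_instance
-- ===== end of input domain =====

-- B replaces A's single mutable-bucket-dict loop by a key function, an ordered dedup of the keys,
-- and one filter per distinct key (alternative decomposition, same results).


-- ===== PORT A =====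
-- the body of A's 'for endpoint in endpoints' loop
def pvStepA (groups : PySem.Dict String (List (List (String × String)))) (endpoint : List (String × String)) : PySem.Dict String (List (List (String × String))) :=
  let path := (PySem.Dict.mk endpoint).getD "endpoint_path" ""
  let service_name : String := "api"                 -- default
  let service_name : String :=
    if PySem.Str.startswith path "/" then
      let parts := PySem.List.slice ((PySem.Str.split? path "/").getD []) (some 1) (some 2)  -- sep "/" ≠ "", split? is some
      match parts with
      | p :: _ => if p = "" then "api" else p        -- parts[0] or 'api'
      | [] => service_name
    else service_name
  let groups := if !(groups.contains service_name) then groups.insert service_name [] else groups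
  groups.modify service_name [] (fun l => l ++ [endpoint])   -- groups[service_name].append(endpoint)

def group_endpoints_by_service_py (endpoints : List (List (String × String))) : List (String × List (List (String × String))) :=
  (endpoints.foldl pvStepA PySem.Dict.empty).items

-- ===== PORT B =====
-- B's local 'key' helper; the 'none' branch is unreachable (a path starting with '/' splits into ≥ 2 parts)
def pvKey (endpoint : List (String × String)) : String :=
  let path := (PySem.Dict.mk endpoint).getD "endpoint_path" ""
  if PySem.Str.startswith path "/" then
    match PySem.List.pyGet? ((PySem.Str.split? path "/").getD []) 1 with
    | some seg => if seg = "" then "api" else seg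
    | none => "api"
  else "api"

def group_endpoints_by_service_py_alt (endpoints : List (List (String × String))) : List (String × List (List (String × String))) :=
  let services := PySem.List.dedup (endpoints.map pvKey)
  services.map (fun s => (s, endpoints.filter (fun e => pvKey e == s)))

-- ===== PRECONDITION & SPEC =====
def Spec_group_endpoints_by_service_py (endpoints : List (List (String × String))) (out : List (String × List (List (String × String)))) : Prop := out = group_endpoints_by_service_py_alt endpoints
instance (endpoints : List (List (String × String))) (out : List (String × List (List (String × String)))) : Decidable (Spec_group_endpoints_by_service_py endpoints out) := by unfold Spec_group_endpoints_by_service_py; infer_instance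

-- ===== CLAIM (what is proved, stated in full; the proofs are below) =====
def Claim_equal_group_endpoints_by_service_py : Prop := ∀ (endpoints : List (List (String × String))), Dom_group_endpoints_by_service_py endpoints → Spec_group_endpoints_by_service_py endpoints (group_endpoints_by_service_py endpoints)

-- ===== LEMMAS AND PROOFS =====

-- A's loop body computes B's key, then inserts-if-absent and appends
lemma pvStepA_eq (d : PySem.Dict String (List (List (String × String)))) (e : List (String × String)) :
    pvStepA d e = (if !(d.contains (pvKey e)) then d.insert (pvKey e) [] else d).modify (pvKey e) [] (fun l => l ++ [e]) := by
  unfold pvStepA pvKey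
  cases h : ((PySem.Str.split? ((PySem.Dict.mk e).getD "endpoint_path" "")) "/").getD [] with
  | nil => simp [h, PySem.List.slice, PySem.List.pyGet?]
  | cons p t =>
    cases t <;>
      simp [h, PySem.List.slice, PySem.List.pyGet?, PySem.List.pyIdx?, PySem.List.clampIdx]

lemma getD_pvStepA (d : PySem.Dict String (List (List (String × String)))) (e : List (String × String)) (s : String) :
    (pvStepA d e).getD s [] = if pvKey e == s then d.getD s [] ++ [e] else d.getD s [] := by
  rw [pvStepA_eq]
  rcases Bool.eq_false_or_eq_true (d.contains (pvKey e)) with hc | hc <;>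
    by_cases hs : s = pvKey e
  · simp [hc, hs]
  · have hs' : ¬ pvKey e = s := fun h => hs h.symm
    simp [hc, hs, hs', PySem.Dict.getD_modify, beq_iff_eq]
  · have hgd := PySem.Dict.getD_of_not_contains (d := d) (k := pvKey e)
      (d0 := ([] : List (List (String × String)))) hc
    simp [hc, hs, hgd]
  · have hs' : ¬ pvKey e = s := fun h => hs h.symm
    simp [hc, hs, hs', PySem.Dict.getD_modify, PySem.Dict.getD_insert, beq_iff_eq]

lemma keys_pvStepA (d : PySem.Dict String (List (List (String × String)))) (e : List (String × String)) :
    (pvStepA d e).keys = PySem.Set.add d.keys (pvKey e) := by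
  rw [pvStepA_eq]
  rcases Bool.eq_false_or_eq_true (d.contains (pvKey e)) with hc | hc
  · have hm : pvKey e ∈ d.keys := (PySem.Dict.contains_iff_mem_keys _ _).1 hc
    simp [hc, PySem.Dict.modify, PySem.Dict.keys_insert_of_contains, PySem.Set.add_of_mem hm]
  · have hm : pvKey e ∉ d.keys := fun h => by
      simp [(PySem.Dict.contains_iff_mem_keys _ _).2 h] at hc
    simp [hc, PySem.Dict.modify, PySem.Dict.insert_insert_self,
      PySem.Dict.keys_insert_of_not_contains, PySem.Set.add_of_not_mem hm]

lemma getD_foldl_pvStepA (xs : List (List (String × String))) :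
    ∀ d s, (xs.foldl pvStepA d).getD s [] = d.getD s [] ++ xs.filter (fun e => pvKey e == s) := by
  induction xs with
  | nil => simp
  | cons x xs ih =>
    intro d s
    simp only [List.foldl_cons, List.filter_cons, ih, getD_pvStepA]
    by_cases h : pvKey x == s <;> simp [h]

lemma keys_foldl_pvStepA (xs : List (List (String × String))) :
    ∀ d, (xs.foldl pvStepA d).keys = PySem.Set.update d.keys (xs.map pvKey) := by
  induction xs with
  | nil => simp [PySem.Set.update_nil]
  | cons x xs ih =>
    intro d
    simp only [List.foldl_cons, List.map_cons, PySem.Set.update_cons, ih, keys_pvStepA]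

-- ===== VERDICT (by name: the statement is the Claim_ definition above) =====
theorem group_endpoints_by_service_py_spec : Claim_equal_group_endpoints_by_service_py := by
  intro endpoints _
  unfold Spec_group_endpoints_by_service_py group_endpoints_by_service_py group_endpoints_by_service_py_alt
  have hkeys : (endpoints.foldl pvStepA PySem.Dict.empty).keys
      = PySem.List.dedup (endpoints.map pvKey) := by
    rw [keys_foldl_pvStepA, PySem.Dict.keys_empty, PySem.Set.update_nil_left,
      PySem.List.dedup_eq_ofList]
  have hnd : (endpoints.foldl pvStepA PySem.Dict.empty).keys.Nodup := by
    rw [hkeys, PySem.List.dedup_eq_ofList]; exact PySem.Set.nodup_ofList _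
  rw [PySem.Dict.items_eq_map_keys _ hnd [], hkeys]
  refine List.map_congr_left (fun s _ => ?_)
  rw [getD_foldl_pvStepA, PySem.Dict.getD_empty]
  simp
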